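-- pv_equiv track=rewrite | github.com/Bartin69/Test-mark | task1/task1.py | circular_path
-- ===== SOURCE A (Python) =====
-- def circular_path(n, m):
--     path = []
--     current_position = 0
--
--     while True:
--         path.append(current_position + 1)
--         current_position = (current_position + m) % n
--         if current_position == 0:
--             break
--
--     return ''.join(map(str, path))
-- ===== SOURCE B (Python) =====
-- def circular_path(n, m):
--     # Closed form: the walk visits i*m % n for i = 0..steps-1, steps = |n| // gcd(n, m).
--     a, b = abs(n), abs(m)
--     while b:
--         a, b = b, a % b
--     steps = abs(n) // a
--     return ''.join(str(i * m % n + 1) for i in range(steps))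
-- ===== Notes on version B (the rewrite author's own statement) =====
-- stated objective: simpler
-- what changed: Replaces the stateful add-and-test loop (step, mod, detect return to 0) with a closed form: the path length is |n| // gcd(n, m) computed up front, and each position is derived directly as i*m % n + 1 over a plain range.
import Mathlib
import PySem

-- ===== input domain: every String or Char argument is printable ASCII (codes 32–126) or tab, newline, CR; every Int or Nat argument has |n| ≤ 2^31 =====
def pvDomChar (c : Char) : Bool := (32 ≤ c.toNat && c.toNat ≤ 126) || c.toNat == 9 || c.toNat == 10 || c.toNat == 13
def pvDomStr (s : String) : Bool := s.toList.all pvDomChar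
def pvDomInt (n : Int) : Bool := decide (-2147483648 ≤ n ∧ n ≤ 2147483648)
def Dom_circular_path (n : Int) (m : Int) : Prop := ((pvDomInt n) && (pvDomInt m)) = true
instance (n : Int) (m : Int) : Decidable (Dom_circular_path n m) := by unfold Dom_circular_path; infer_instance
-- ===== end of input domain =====

-- B replaces A's stateful step-and-detect loop by the closed form: steps = |n| // gcd(n,m),
-- position i is i*m % n + 1 (objective: simpler; A raises on n = 0, excluded by Pre_; B returns "" there when m ≠ 0).


-- ===== PORT A =====
-- A's 'while True' loop: append cur+1, step cur := (cur+m) % n, break when cur = 0.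
-- Fuel n.natAbs; under Pre_ (n ≠ 0) the loop provably breaks within n.natAbs iterations, so fuel never runs out.
def circAloop (n m : Int) : Nat → Int → List Int → List Int
  | 0, _, path => path    -- unreachable under Pre_circular_path
  | fuel + 1, cur, path =>
    let path' := path ++ [cur + 1]
    let cur' := PySem.Int.mod (cur + m) n
    if cur' = 0 then path' else circAloop n m fuel cur' path'

def circular_path (n : Int) (m : Int) : String :=
  PySem.Str.join "" ((circAloop n m n.natAbs 0 []).map PySem.Int.toStr)

-- ===== PORT B =====
-- Source B's hand-written Euclid loop: while b: a, b = b, a % b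
def circGcd (a b : Nat) : Nat :=
  if b = 0 then a else circGcd b (a % b)
termination_by b
decreasing_by exact Nat.mod_lt _ (by omega)

def circular_path_alt (n : Int) (m : Int) : String :=
  let g := circGcd n.natAbs m.natAbs
  let steps : Int := (n.natAbs / g : Nat)
  PySem.Str.join ""
    ((PySem.List.pyRange 0 steps 1).map (fun i => PySem.Int.toStr (PySem.Int.mod (i * m) n + 1)))

-- ===== PRECONDITION & SPEC =====
-- Pre_ excludes exactly n = 0, where A raises ZeroDivisionError at the first '% n'.
def Pre_circular_path (n : Int) (m : Int) : Prop := n ≠ 0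
instance (n : Int) (m : Int) : Decidable (Pre_circular_path n m) := by unfold Pre_circular_path; infer_instance
def pvWitness_circular_path : Int × Int := (6, 4)

def Spec_circular_path (n : Int) (m : Int) (out : String) : Prop := out = circular_path_alt n m
instance (n : Int) (m : Int) (out : String) : Decidable (Spec_circular_path n m out) := by unfold Spec_circular_path; infer_instance

-- ===== CLAIM (what is proved, stated in full; the proofs are below) =====
def Claim_equal_circular_path : Prop := ∀ (n : Int) (m : Int), Dom_circular_path n m → Pre_circular_path n m → Spec_circular_path n m (circular_path n m)
-- ===== LEMMAS AND PROOFS =====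

-- the hand-written Euclid loop is Nat.gcd with swapped arguments
lemma circGcd_eq (a b : Nat) : circGcd a b = Nat.gcd b a := by
  induction b using Nat.strong_induction_on generalizing a with
  | _ b ih =>
    rw [circGcd]
    by_cases h : b = 0
    · simp [h]
    · rw [if_neg h, ih (a % b) (Nat.mod_lt _ (by omega)) b]
      exact (Nat.gcd_rec b a).symm

-- Python '%' is congruent: folding the accumulated position through mod does not change it
lemma mod_add_mod (a m n : Int) : PySem.Int.mod (PySem.Int.mod a n + m) n = PySem.Int.mod (a + m) n := by
  simp [PySem.Int.mod]

-- A's loop, entered at step i with cur = (i*m) % n, runs exactly d = k - i more iterations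
lemma circAloop_eq (n m : Int) (k : Nat)
    (hdvd : ∀ j : Nat, 0 < j → j ≤ k → ((n ∣ (j : Int) * m) ↔ j = k)) :
    ∀ d : Nat, 1 ≤ d → ∀ (i fuel : Nat) (path : List Int), i + d = k → d ≤ fuel →
      circAloop n m fuel (PySem.Int.mod ((i : Int) * m) n) path
        = path ++ (List.range' i d).map (fun (j : Nat) => PySem.Int.mod ((j : Int) * m) n + 1) := by
  intro d
  induction d with
  | zero => omega
  | succ d ih =>
    intro _ i fuel path hik hfuel
    obtain ⟨fu, rfl⟩ : ∃ fu, fuel = fu + 1 := ⟨fuel - 1, by omega⟩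
    rw [circAloop]
    have hstep : PySem.Int.mod (PySem.Int.mod ((i : Int) * m) n + m) n
        = PySem.Int.mod (((i : Nat) + 1 : Int) * m) n := by
      rw [mod_add_mod]; ring_nf
    by_cases hd : d = 0
    · -- last iteration: i + 1 = k, next cur is 0
      subst hd
      have hk : i + 1 = k := by omega
      have h0 : PySem.Int.mod (PySem.Int.mod ((i : Int) * m) n + m) n = 0 := by
        rw [hstep, PySem.Int.mod_eq_zero_iff_dvd]
        have := (hdvd (i + 1) (by omega) (by omega)).mpr hk
        exact_mod_cast this
      simp [h0, List.range']
    · -- the next cur is nonzero: recurse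
      have hne : PySem.Int.mod (PySem.Int.mod ((i : Int) * m) n + m) n ≠ 0 := by
        rw [hstep]
        intro h0'
        have hdv := (PySem.Int.mod_eq_zero_iff_dvd _ _).mp h0' 
        have : i + 1 = k := (hdvd (i + 1) (by omega) (by omega)).mp (by exact_mod_cast hdv)
        omega
      simp only [hne, if_false]
      rw [hstep]
      have := ih (by omega) (i + 1) fu (path ++ [PySem.Int.mod ((i : Int) * m) n + 1]) (by omega) (by omega)
      push_cast at this ⊢
      rw [this, List.range'_succ]
      simp

-- the number-theoretic core: with k = |n| / gcd(|n|,|m|) and n ≠ 0, n ∣ j*m for 0 < j ≤ k exactly at j = k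
lemma dvd_iff_eq_steps (n m : Int) (hn : n ≠ 0) (j : Nat) (hj : 0 < j)
    (hjk : j ≤ n.natAbs / Nat.gcd n.natAbs m.natAbs) :
    (n ∣ (j : Int) * m) ↔ j = n.natAbs / Nat.gcd n.natAbs m.natAbs := by
  set N := n.natAbs with hN
  set M := m.natAbs with hM
  set g := Nat.gcd N M with hg
  have hNpos : 0 < N := Int.natAbs_pos.mpr hn
  have hgpos : 0 < g := Nat.gcd_pos_of_pos_left M hNpos
  have hgN : g ∣ N := Nat.gcd_dvd_left N M
  have hgM : g ∣ M := Nat.gcd_dvd_right N M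
  have hnat : (n ∣ (j : Int) * m) ↔ N ∣ j * M := by
    rw [← Int.natAbs_dvd_natAbs, Int.natAbs_mul, Int.natAbs_natCast]
  rw [hnat]
  constructor
  · intro hdv
    -- divide through by g and use coprimality
    have hco : Nat.Coprime (N / g) (M / g) := Nat.coprime_div_gcd_div_gcd hgpos
    have h1 : N / g ∣ j * (M / g) := by
      obtain ⟨N', hN'⟩ := hgN
      obtain ⟨M', hM'⟩ := hgM
      have hN'' : N / g = N' := by rw [hN']; exact Nat.mul_div_cancel_left _ hgpos
      have hM'' : M / g = M' := by rw [hM']; exact Nat.mul_div_cancel_left _ hgpos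
      rw [hN'', hM'']
      have : g * N' ∣ g * (j * M') := by
        rw [← hN']
        calc N ∣ j * M := hdv
          _ = g * (j * M') := by rw [hM']; ring
      exact (Nat.mul_dvd_mul_iff_left hgpos).mp this
    have h2 : N / g ∣ j := hco.dvd_of_dvd_mul_right h1
    have := Nat.le_of_dvd hj h2
    omega
  · rintro rfl
    -- (N/g) * M = N * (M/g), a multiple of N
    obtain ⟨M', hM'⟩ := hgM
    have hM'' : M / g = M' := by rw [hM']; exact Nat.mul_div_cancel_left _ hgpos
    have : N / g * M = N * M' := by
      obtain ⟨N', hN'⟩ := hgN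
      have hN'' : N / g = N' := by rw [hN']; exact Nat.mul_div_cancel_left _ hgpos
      rw [hN'', hM', hN']; ring
    exact ⟨M', this⟩

-- ===== VERDICT (by name: the statement is the Claim_ definition above) =====
theorem circular_path_spec : Claim_equal_circular_path := by
  intro n m _ hn
  unfold Spec_circular_path circular_path circular_path_alt
  set N := n.natAbs with hN
  set g := Nat.gcd N m.natAbs with hg
  set k := N / g with hk
  have hNpos : 0 < N := Int.natAbs_pos.mpr hn
  have hgpos : 0 < g := Nat.gcd_pos_of_pos_left _ hNpos
  have hkpos : 0 < k := Nat.div_pos (Nat.le_of_dvd hNpos (Nat.gcd_dvd_left N m.natAbs)) hgpos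
  have hkN : k ≤ N := Nat.div_le_self N g
  have hloop := circAloop_eq n m k
    (fun j hj hjk => dvd_iff_eq_steps n m hn j hj hjk)
    k hkpos 0 N [] (by omega) hkN
  have h0 : PySem.Int.mod ((0 : Nat) * m) n = 0 := by
    simp [PySem.Int.mod]
  rw [h0] at hloop
  rw [hloop]
  have hgcd : circGcd N m.natAbs = g := by rw [circGcd_eq, Nat.gcd_comm]
  rw [hgcd]
  congr 1
  rw [PySem.List.pyRange_one]
  simp only [sub_zero, Int.toNat_natCast, List.map_map, List.nil_append, ← List.range_eq_range']
  apply List.map_congr_left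
  intro x _
  simp
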